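-- pv_equiv track=rewrite | github.com/JSMTHWCK/computation-and-modeling-homework | 001/code.py | get_first_n_terms_nonrecursive
-- ===== SOURCE A (Python) =====
-- def get_first_n_terms_nonrecursive(n):
--     terms = []
--
--     for i in range(1, n+1):
--
--         if i == 1:
--             newnum = 5
--             terms.append(newnum)
--
--         else:
--             newnum = 3 * (terms[i-2]) - 4
--             terms.append(newnum)
--
--     return terms
-- ===== SOURCE B (Python) =====
-- def get_first_n_terms_nonrecursive(n):
--     # closed form: a_i = 3**i + 2 (a_1 = 5, a_i = 3*a_{i-1} - 4)
--     return [3 ** i + 2 for i in range(1, n + 1)]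
-- ===== Notes on version B (the rewrite author's own statement) =====
-- stated objective: simpler
-- what changed: B computes each term directly from the closed form a_i = 3**i + 2, eliminating the accumulating list state and the read of the previous term that A's recurrence loop maintains.
import Mathlib
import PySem

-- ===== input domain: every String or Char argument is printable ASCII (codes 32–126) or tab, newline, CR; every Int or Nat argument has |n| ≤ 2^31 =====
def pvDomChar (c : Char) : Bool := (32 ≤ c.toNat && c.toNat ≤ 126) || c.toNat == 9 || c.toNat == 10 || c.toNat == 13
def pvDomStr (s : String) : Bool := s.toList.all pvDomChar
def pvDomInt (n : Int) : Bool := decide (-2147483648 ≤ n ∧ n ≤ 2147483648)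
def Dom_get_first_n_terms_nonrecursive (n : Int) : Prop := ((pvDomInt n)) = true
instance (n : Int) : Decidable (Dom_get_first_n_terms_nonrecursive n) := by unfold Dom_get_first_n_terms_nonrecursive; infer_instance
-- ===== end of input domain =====

-- B replaces A's recurrence loop (each term read back from the list) by the closed form 3^i + 2: simpler, no running state.

-- ===== PORT A =====
-- A appends 5 for i = 1 and 3*terms[i-2] - 4 otherwise; terms[i-2] is always in range
-- (terms has i-1 elements when index i-2 is read), so pyGetD with default 0 is exact here.
def get_first_n_terms_nonrecursive (n : Int) : List Int :=
  (PySem.List.pyRange 1 (n + 1) 1).foldl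
    (fun terms i =>
      if i == 1 then terms ++ [5]
      else terms ++ [3 * PySem.List.pyGetD terms (i - 2) 0 - 4])
    []

-- ===== PORT B =====
-- i ranges over 1..n, so i.toNat = i exactly; 3 ^ i.toNat is Python's 3 ** i.
def get_first_n_terms_nonrecursive_alt (n : Int) : List Int :=
  (PySem.List.pyRange 1 (n + 1) 1).map (fun i => 3 ^ i.toNat + 2)

-- ===== PRECONDITION & SPEC =====
def Spec_get_first_n_terms_nonrecursive (n : Int) (out : List Int) : Prop := out = get_first_n_terms_nonrecursive_alt n
instance (n : Int) (out : List Int) : Decidable (Spec_get_first_n_terms_nonrecursive n out) := by unfold Spec_get_first_n_terms_nonrecursive; infer_instance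

-- ===== CLAIM (what is proved, stated in full; the proofs are below) =====
def Claim_equal_get_first_n_terms_nonrecursive : Prop := ∀ (n : Int), Dom_get_first_n_terms_nonrecursive n → Spec_get_first_n_terms_nonrecursive n (get_first_n_terms_nonrecursive n)

-- ===== LEMMAS AND PROOFS =====

theorem pv_key (m : Nat) :
    (PySem.List.pyRange 1 (1 + (m : Int)) 1).foldl
      (fun terms i =>
        if i == 1 then terms ++ [5]
        else terms ++ [3 * PySem.List.pyGetD terms (i - 2) 0 - 4])
      ([] : List Int)
    = (PySem.List.pyRange 1 (1 + (m : Int)) 1).map (fun i => 3 ^ i.toNat + 2) := by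
  induction m with
  | zero => simp [PySem.List.pyRange_one_eq_nil]
  | succ k ih =>
    have hsplit : PySem.List.pyRange 1 (1 + ((k : Int) + 1)) 1
        = PySem.List.pyRange 1 (1 + (k : Int)) 1 ++ [1 + (k : Int)] := by
      have := PySem.List.pyRange_one_succ_right (a := 1) (b := 1 + (k : Int)) (by omega)
      simpa [add_assoc] using this
    push_cast
    rw [hsplit, List.foldl_append, List.map_append, ih]
    simp only [List.foldl_cons, List.foldl_nil, List.map_cons, List.map_nil]
    cases k with
    | zero => norm_num
    | succ j =>
      have hne : (1 + (((j : Nat) : Int) + 1) == 1) = false := by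
        simp only [beq_eq_false_iff_ne, ne_eq]
        omega
      push_cast
      rw [hne]
      simp only [Bool.false_eq_true, if_false]
      have hidx : (1 : Int) + ((j : Nat) + 1) - 2 = ((j : Nat) : Int) := by ring
      rw [hidx]
      have hj : (j : Nat) < (((1 : Int) + ((j : Nat) + 1)) - 1).toNat := by omega
      rw [PySem.List.pyGetD_map_pyRange_one (fun i => 3 ^ i.toNat + 2) 1 (1 + ((j : Nat) + 1)) j 0 hj]
      have h2 : ((1 : Int) + (j : Nat)).toNat = j + 1 := by omega
      have h3 : ((1 : Int) + ((j : Nat) + 1)).toNat = j + 2 := by omega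
      simp only [h2, h3]
      congr 2
      ring

-- ===== VERDICT (by name: the statement is the Claim_ definition above) =====
theorem get_first_n_terms_nonrecursive_spec : Claim_equal_get_first_n_terms_nonrecursive := by
  intro n _
  unfold Spec_get_first_n_terms_nonrecursive get_first_n_terms_nonrecursive get_first_n_terms_nonrecursive_alt
  by_cases h : n ≤ 0
  · rw [PySem.List.pyRange_one_eq_nil (by omega)]
    simp
  · have hm : n + 1 = 1 + ((n.toNat : Nat) : Int) := by omega
    rw [hm]
    exact pv_key n.toNat
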